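-- pv_equiv track=rewrite | github.com/rinkeshpanwar/datastructure | mountblue2.py | largestStar
-- ===== SOURCE A (Python) =====
-- def largestStar(star):
--     maxStar = 0
--     count = -1
--     for i in star:
--         if i == '|' and count<0:
--             count+=1
--         elif count>-1 and i=='|':
--             maxStar = max(maxStar,count)
--             count = 0
--         elif count>-1:
--             count+=1
--         else:
--             continue
--
--     return maxStar
-- ===== SOURCE B (Python) =====
-- def largestStar(star):
--     mids = star.split('|')[1:-1]
--     return max((len(p) for p in mids), default=0)
-- ===== Notes on version B (the rewrite author's own statement) =====
-- stated objective: simpler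
-- what changed: Replaces A's stateful one-pass scanner (count/maxStar state machine with four branches) with a split on the pipe delimiter followed by a max over the lengths of the interior segments.
import Mathlib
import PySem

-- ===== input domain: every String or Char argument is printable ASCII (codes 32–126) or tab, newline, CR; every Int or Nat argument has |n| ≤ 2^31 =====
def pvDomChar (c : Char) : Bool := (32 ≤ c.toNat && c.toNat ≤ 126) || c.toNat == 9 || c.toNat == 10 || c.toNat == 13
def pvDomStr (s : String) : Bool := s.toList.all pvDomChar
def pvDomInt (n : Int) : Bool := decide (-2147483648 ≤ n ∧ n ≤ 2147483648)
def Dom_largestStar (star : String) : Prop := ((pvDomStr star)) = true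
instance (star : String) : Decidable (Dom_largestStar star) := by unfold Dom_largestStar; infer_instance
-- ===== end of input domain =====

-- B replaces A's four-branch count/maxStar scanner with split('|') + max over interior segment lengths (objective: simpler).

-- ===== PORT A =====
-- the for-loop of A, state (maxStar, count), branches in A's order
def largestStarLoop (maxStar count : Int) : List Char → Int
  | [] => maxStar
  | i :: rest =>
    if i = '|' ∧ count < 0 then largestStarLoop maxStar (count + 1) rest
    else if count > -1 ∧ i = '|' then largestStarLoop (max maxStar count) 0 rest
    else if count > -1 then largestStarLoop maxStar (count + 1) rest
    else largestStarLoop maxStar count rest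

def largestStar (star : String) : Int := largestStarLoop 0 (-1) star.toList

-- ===== PORT B =====
def largestStar_alt (star : String) : Int :=
  let mids := PySem.List.slice ((PySem.Str.split? star "|").getD []) (some 1) (some (-1))
  ((PySem.List.max? (mids.map PySem.Str.len) id).getD 0)

-- ===== PRECONDITION & SPEC =====
def Spec_largestStar (star : String) (out : Int) : Prop := out = largestStar_alt star
instance (star : String) (out : Int) : Decidable (Spec_largestStar star out) := by unfold Spec_largestStar; infer_instance

-- ===== CLAIM (what is proved, stated in full; the proofs are below) =====
def Claim_equal_largestStar : Prop := ∀ (star : String), Dom_largestStar star → Spec_largestStar star (largestStar star)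

-- ===== LEMMAS AND PROOFS =====

-- simple recursive characterisation of splitting a char list at '|'
def pvAddFirst (p : List Char) : List (List Char) → List (List Char)
  | [] => [p]
  | s :: ss => (p ++ s) :: ss

def pvSplit : List Char → List (List Char)
  | [] => [[]]
  | c :: rest => if c = '|' then [] :: pvSplit rest else pvAddFirst [c] (pvSplit rest)

theorem pvSplit_ne_nil (l : List Char) : pvSplit l ≠ [] := by
  cases l with
  | nil => simp [pvSplit]
  | cons c rest =>
    simp only [pvSplit]
    split
    · simp
    · cases h : pvSplit rest <;> simp [pvAddFirst]

theorem pvAddFirst_addFirst (p q : List Char) (ss : List (List Char)) :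
    pvAddFirst p (pvAddFirst q ss) = pvAddFirst (p ++ q) ss := by
  cases ss <;> simp [pvAddFirst]

theorem splitOn_go_eq (fuel : Nat) (l cur : List Char) (acc : List (List Char))
    (h : l.length < fuel) :
    PySem.Chars.splitOn.go ['|'] fuel l cur acc
      = acc.reverse ++ pvAddFirst cur.reverse (pvSplit l) := by
  induction fuel generalizing l cur acc with
  | zero => omega
  | succ fuel ih =>
    cases l with
    | nil => simp [PySem.Chars.splitOn.go, pvSplit, pvAddFirst]
    | cons c rest =>
      simp only [PySem.Chars.splitOn.go]
      by_cases hc : c = '|'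
      · subst hc
        have hp : List.isPrefixOf ['|'] ('|' :: rest) = true := by
          simp [List.isPrefixOf]
        simp only [hp, if_pos]
        rw [ih _ _ _ (by simpa using Nat.lt_of_succ_lt_succ h)]
        cases hs : pvSplit rest with
        | nil => exact absurd hs (pvSplit_ne_nil rest)
        | cons a b => simp [pvSplit, pvAddFirst, hs]
      · have hp : List.isPrefixOf ['|'] (c :: rest) = false := by
          simp [List.isPrefixOf]
          intro h'; exact (hc h'.symm).elim
        simp only [hp, Bool.false_eq_true, if_false]
        rw [ih _ _ _ (by simpa using Nat.lt_of_succ_lt_succ h)]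
        simp only [pvSplit, if_neg hc, List.reverse_cons]
        rw [← pvAddFirst_addFirst]
    
theorem splitOn_eq (l : List Char) : PySem.Chars.splitOn l ['|'] = pvSplit l := by
  unfold PySem.Chars.splitOn
  rw [splitOn_go_eq _ _ _ _ (by omega)]
  cases h : pvSplit l with
  | nil => exact (pvSplit_ne_nil l h).elim
  | cons a b => simp [pvAddFirst]

-- the tail of A's loop, once the first '|' has been seen: count ≥ 0
def pvG (m c : Int) : List (List Char) → Int
  | [] => m
  | [_] => m
  | s :: ss => pvG (max m (c + s.length)) 0 ss

theorem pvG_addFirst (m c : Int) (a : Char) (ss : List (List Char)) :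
    pvG m c (pvAddFirst [a] ss) = pvG m (c + 1) ss := by
  cases ss with
  | nil => simp [pvAddFirst, pvG]
  | cons s t =>
    cases t with
    | nil => simp [pvAddFirst, pvG]
    | cons u v =>
      simp only [pvAddFirst, pvG, List.length_cons, List.length_append, List.length_nil]
      congr 2
      push_cast
      ring

theorem loop_after (l : List Char) (m c : Int) (hc : 0 ≤ c) :
    largestStarLoop m c l = pvG m c (pvSplit l) := by
  induction l generalizing m c with
  | nil => simp [largestStarLoop, pvSplit, pvG]
  | cons i rest ih =>
    simp only [largestStarLoop]
    by_cases hi : i = '|'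
    · rw [if_neg (by omega), if_pos ⟨by omega, hi⟩]
      rw [ih _ _ (by omega)]
      subst hi
      simp only [pvSplit]
      cases hs : pvSplit rest with
      | nil => exact (pvSplit_ne_nil rest hs).elim
      | cons a b => simp [pvG]
    · rw [if_neg (by simp [hi]), if_neg (by simp [hi]), if_pos (by omega)]
      rw [ih _ _ (by omega)]
      simp only [pvSplit, if_neg hi]
      rw [pvG_addFirst]

theorem loop_before (l : List Char) (m : Int) :
    largestStarLoop m (-1) l = pvG m 0 (pvSplit l).tail := by
  induction l generalizing m with
  | nil => simp [largestStarLoop, pvSplit, pvG]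
  | cons i rest ih =>
    simp only [largestStarLoop]
    by_cases hi : i = '|'
    · rw [if_pos ⟨hi, by omega⟩]
      have : (-1 : Int) + 1 = 0 := by omega
      rw [this, loop_after _ _ _ (by omega)]
      subst hi
      simp [pvSplit]
    · rw [if_neg (by simp [hi]), if_neg (by simp [hi]), if_neg (by omega)]
      rw [ih]
      simp only [pvSplit, if_neg hi]
      cases hs : pvSplit rest with
      | nil => exact (pvSplit_ne_nil rest hs).elim
      | cons a b => simp [pvAddFirst]

-- pvG as a fold over the lengths of all but the last segment
theorem pvG_eq_foldl (ss : List (List Char)) (m : Int) :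
    pvG m 0 ss = List.foldl (fun a (s : List Char) => max a (s.length : Int)) m ss.dropLast := by
  induction ss generalizing m with
  | nil => simp [pvG]
  | cons s t ih =>
    cases t with
    | nil => simp [pvG]
    | cons u v =>
      simp only [pvG, List.dropLast_cons_of_ne_nil (by simp : u :: v ≠ []), List.foldl_cons]
      rw [ih]
      norm_num

-- B's max?-with-default as a fold, for nonnegative elements
def pvStep (acc : Option Int) (x : Int) : Option Int :=
  match acc with
  | none => some x
  | some m => if m < x then some x else some m

theorem max?_eq_foldl_pvStep (l : List Int) :
    PySem.List.max? l id = List.foldl pvStep none l := by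
  unfold PySem.List.max?
  congr 1
  funext acc x
  cases acc <;> simp [pvStep]

theorem maxGetD_some (l : List Int) (m : Int) :
    (List.foldl pvStep (some m) l).getD 0 = List.foldl (fun a b => max a b) m l := by
  induction l generalizing m with
  | nil => simp
  | cons x t ih =>
    simp only [List.foldl_cons, pvStep]
    by_cases h : m < x
    · rw [if_pos h, ih]
      congr 1; omega
    · rw [if_neg h, ih]
      congr 1; omega

theorem max?_getD_eq_foldl (l : List Int) (hl : ∀ x ∈ l, 0 ≤ x) :
    ((PySem.List.max? l id).getD 0) = List.foldl (fun a b => max a b) 0 l := by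
  rw [max?_eq_foldl_pvStep]
  cases l with
  | nil => simp
  | cons x t =>
    simp only [List.foldl_cons, pvStep]
    rw [maxGetD_some]
    rw [show max (0 : Int) x = x by have := hl x (by simp); omega]

theorem slice_one_neg_one {α : Type} (l : List α) :
    PySem.List.slice l (some 1) (some (-1)) = l.tail.dropLast := by
  simp only [PySem.List.slice, PySem.List.clampIdx]
  cases l with
  | nil => simp
  | cons a t =>
    simp only [List.length_cons]
    norm_num
    rw [List.dropLast_eq_take]
    congr 1

-- ===== VERDICT (by name: the statement is the Claim_ definition above) =====
theorem largestStar_spec : Claim_equal_largestStar := by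
  intro star _
  unfold Spec_largestStar largestStar largestStar_alt
  rw [loop_before]
  simp only [PySem.Str.split?, PySem.Chars.split?]
  rw [show ("|" : String).toList = ['|'] from rfl]
  rw [if_neg (by decide)]
  simp only [Option.map_some, Option.getD_some]
  rw [splitOn_eq, slice_one_neg_one]
  rw [max?_getD_eq_foldl]
  · rw [pvG_eq_foldl]
    simp only [← List.map_tail, ← List.map_dropLast, List.map_map, List.foldl_map]
    simp [PySem.Str.len]
  · intro x hx
    simp only [List.mem_map] at hx
    obtain ⟨s, _, rfl⟩ := hx
    simp [PySem.Str.len]
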